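-- pv_equiv track=rewrite | github.com/TTyb/TTyb.github.io | static/postimage/machinelearning/fptree/FPtree.py | getkinds
-- ===== SOURCE A (Python) =====
-- def getkinds(array):
--     temp = []
--     for item in array:
--         for value in item:
--             if value in temp:
--                 pass
--             else:
--                 temp.append(value)
--     # ['C', 'B', 'E', 'D', 'A']
--     # ['A', 'B', 'C', 'D', 'E']
--     return sorted(temp)
-- ===== SOURCE B (Python) =====
-- def getkinds(array):
--     flat = []
--     for item in array:
--         flat.extend(item)
--     flat.sort()
--     out = []
--     for v in flat:
--         if not out or out[-1] != v:
--             out.append(v)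
--     return out
-- ===== Notes on version B (the rewrite author's own statement) =====
-- stated objective: faster
-- what changed: Replaces the quadratic membership-scan dedup followed by a sort with flatten, sort once, then a single linear adjacent-duplicate pass.
import Mathlib
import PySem

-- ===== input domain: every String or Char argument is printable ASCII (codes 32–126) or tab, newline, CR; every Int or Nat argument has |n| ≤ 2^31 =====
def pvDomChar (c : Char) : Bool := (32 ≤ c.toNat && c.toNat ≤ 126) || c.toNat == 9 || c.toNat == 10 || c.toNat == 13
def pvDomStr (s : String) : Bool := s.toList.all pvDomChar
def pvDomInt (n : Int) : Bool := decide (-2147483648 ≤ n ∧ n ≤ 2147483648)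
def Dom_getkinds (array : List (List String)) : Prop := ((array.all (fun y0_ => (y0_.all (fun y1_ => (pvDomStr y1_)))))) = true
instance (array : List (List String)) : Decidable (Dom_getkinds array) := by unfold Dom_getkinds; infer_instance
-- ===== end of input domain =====

-- B flattens, sorts once and removes adjacent duplicates in one linear pass, instead of A's
-- quadratic membership-scan dedup followed by a sort; return values agree everywhere.

-- ===== PORT A =====
-- temp accumulates first occurrences via a membership test, then sorted(temp)
def getkinds (array : List (List String)) : List String :=
  let temp := array.foldl
    (fun temp item => item.foldl (fun t value => if value ∈ t then t else t ++ [value]) temp) []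
  PySem.List.sorted temp (fun x => x) false

-- ===== PORT B =====
-- one step of the adjacent-duplicate pass: append v unless it equals the last kept element
def dedupStep (out : List String) (v : String) : List String :=
  if out.getLast? = some v then out else out ++ [v]

def getkinds_alt (array : List (List String)) : List String :=
  let flat := array.foldl (fun f item => f ++ item) []
  let s := PySem.List.sorted flat (fun x => x) false
  s.foldl dedupStep []

-- ===== PRECONDITION & SPEC =====
def Spec_getkinds (array : List (List String)) (out : List String) : Prop := out = getkinds_alt array
instance (array : List (List String)) (out : List String) : Decidable (Spec_getkinds array out) := by unfold Spec_getkinds; infer_instance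

-- ===== CLAIM (what is proved, stated in full; the proofs are below) =====
def Claim_equal_getkinds : Prop := ∀ (array : List (List String)), Dom_getkinds array → Spec_getkinds array (getkinds array)

-- ===== LEMMAS AND PROOFS =====

-- A's nested loop is exactly PySem.List.dedup of the flattened input
lemma temp_eq_dedup (array : List (List String)) :
    array.foldl
      (fun temp item => item.foldl (fun t value => if value ∈ t then t else t ++ [value]) temp) [] =
    PySem.List.dedup array.flatten := by
  simp only [PySem.List.dedup, PySem.Set.ofList, ← List.foldl_flatten]
  congr 1
  funext t v
  simp [PySem.Set.add, PySem.Set.contains]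

-- B's flatten loop is List.flatten
lemma flat_eq_flatten (array : List (List String)) :
    array.foldl (fun f item => f ++ item) [] = array.flatten := by
  suffices h : ∀ (init : List String), array.foldl (fun f item => f ++ item) init = init ++ array.flatten by
    simpa using h []
  induction array with
  | nil => simp
  | cons h t ih => intro init; simp [ih, List.flatten_cons]

-- in a (·≤·)-pairwise list, every member is ≤ the last element
lemma mem_le_getLast? (acc : List String) (a l : String)
    (hp : acc.Pairwise (· ≤ ·)) (ha : a ∈ acc) (hl : acc.getLast? = some l) : a ≤ l := by
  induction acc with
  | nil => cases ha
  | cons x xs ih =>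
      rcases List.pairwise_cons.mp hp with ⟨hx, hxs⟩
      cases xs with
      | nil =>
          simp at hl ha; subst hl; subst ha; rfl
      | cons y ys =>
          rw [List.getLast?_cons_cons] at hl
          rcases List.mem_cons.mp ha with rfl | ha'
          · exact hx l (List.mem_of_getLast? hl)
          · exact ih hxs ha' hl

-- the invariant of B's adjacent-duplicate pass
lemma foldDedup_inv (s : List String) : ∀ (acc : List String),
    s.Pairwise (· ≤ ·) → acc.Pairwise (· < ·) →
    (∀ a ∈ acc, ∀ b ∈ s, a ≤ b) →
    (s.foldl dedupStep acc).Pairwise (· < ·) ∧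
      (∀ x, x ∈ s.foldl dedupStep acc ↔ x ∈ acc ∨ x ∈ s) := by
  induction s with
  | nil => intro acc _ hacc _; simpa using hacc
  | cons v t ih =>
      intro acc hs hacc hle
      rcases List.pairwise_cons.mp hs with ⟨hvt, ht⟩
      simp only [List.foldl_cons]
      by_cases h : acc.getLast? = some v
      · have hv : v ∈ acc := List.mem_of_getLast? h
        have step : dedupStep acc v = acc := by simp [dedupStep, h]
        rw [step]
        have hle' : ∀ a ∈ acc, ∀ b ∈ t, a ≤ b := fun a ha b hb => hle a ha b (List.mem_cons_of_mem _ hb)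
        rcases ih acc ht hacc hle' with ⟨hp, hm⟩
        refine ⟨hp, fun x => ?_⟩
        rw [hm x]
        constructor
        · rintro (hx | hx)
          · exact Or.inl hx
          · exact Or.inr (List.mem_cons_of_mem _ hx)
        · rintro (hx | hx)
          · exact Or.inl hx
          · rcases List.mem_cons.mp hx with rfl | hx'
            · exact Or.inl hv
            · exact Or.inr hx'
      · have step : dedupStep acc v = acc ++ [v] := by simp [dedupStep, h]
        rw [step]
        have hlt : ∀ a ∈ acc, a < v := by
          intro a ha
          have hav : a ≤ v := hle a ha v List.mem_cons_self
          rcases lt_or_eq_of_le hav with hlt | rfl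
          · exact hlt
          · -- a = v ∈ acc; the last element l of acc satisfies a ≤ l ≤ a, so l = a, contradicting h
            exfalso
            obtain ⟨l, hl⟩ := Option.isSome_iff_exists.mp (List.getLast?_isSome.mpr (List.ne_nil_of_mem ha))
            have h1 : a ≤ l := mem_le_getLast? acc a l (hacc.imp le_of_lt) ha hl
            have h2 : l ≤ a := hle l (List.mem_of_getLast? hl) a List.mem_cons_self
            exact h (by rw [hl, le_antisymm h2 h1])
        have hacc' : (acc ++ [v]).Pairwise (· < ·) := by
          rw [List.pairwise_append]
          exact ⟨hacc, List.pairwise_singleton _ _, fun a ha b hb => by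
            simp at hb; subst hb; exact hlt a ha⟩
        have hle' : ∀ a ∈ acc ++ [v], ∀ b ∈ t, a ≤ b := by
          intro a ha b hb
          rcases List.mem_append.mp ha with ha' | ha'
          · exact hle a ha' b (List.mem_cons_of_mem _ hb)
          · simp at ha'; subst ha'; exact hvt b hb
        rcases ih (acc ++ [v]) ht hacc' hle' with ⟨hp, hm⟩
        refine ⟨hp, fun x => ?_⟩
        rw [hm x]
        simp only [List.mem_append, List.mem_cons]
        tauto

-- ===== VERDICT (by name: the statement is the Claim_ definition above) =====
theorem getkinds_spec : Claim_equal_getkinds := by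
  intro array _
  unfold Spec_getkinds getkinds getkinds_alt
  simp only [temp_eq_dedup, flat_eq_flatten]
  set F := array.flatten with hF
  have hsorted : (PySem.List.sorted F (fun x => x) false).Pairwise (· ≤ ·) := by
    have := PySem.List.sorted_pairwise F (fun x => x)
    simpa using this
  obtain ⟨hp, hm⟩ := foldDedup_inv (PySem.List.sorted F (fun x => x) false) []
    hsorted List.Pairwise.nil (by intro a ha; cases ha)
  refine PySem.List.sorted_eq_of_perm_of_pairwise_lt _ _ _ ?_ (by simpa using hp)
  -- the dedup pass result is a permutation of dedup F: both Nodup with the same members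
  have hnodupB : ((PySem.List.sorted F (fun x => x) false).foldl dedupStep []).Nodup :=
    hp.imp ne_of_lt
  have hnodupA : (PySem.List.dedup F).Nodup := PySem.List.nodup_dedup F
  rw [List.perm_ext_iff_of_nodup hnodupB hnodupA]
  intro x
  rw [hm x, PySem.List.mem_dedup]
  simp [PySem.List.mem_sorted]
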